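-- pv_equiv track=rewrite | github.com/escofresco/cs22 | util/file_reader.py | next_alnum
-- ===== SOURCE A (Python) =====
-- from itertools import chain
--
-- def next_alnum(line):
--     """Read numeric strings from a comma-separated line.
--
--     Yields:
--         Next alphanumeric string in line
--     """
--     word = []
--
--     for char in chain(line, ','):
--
--         if char.isalnum():
--             word.append(char)
--
--         if char ==  ',':
--             yield ''.join(word)
--             word = []
-- ===== SOURCE B (Python) =====
-- def next_alnum(line):
--     """Read numeric strings from a comma-separated line.
--
--     Yields:
--         Next alphanumeric string in line
--     """
--     for segment in line.split(','):
--         yield ''.join(c for c in segment if c.isalnum())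
-- ===== Notes on version B (the rewrite author's own statement) =====
-- stated objective: idiomatic
-- what changed: B splits the line into comma-separated segments with str.split and filters each segment's alphanumeric characters, instead of A's single scan with a manual char accumulator and a chained comma sentinel.
import Mathlib
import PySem

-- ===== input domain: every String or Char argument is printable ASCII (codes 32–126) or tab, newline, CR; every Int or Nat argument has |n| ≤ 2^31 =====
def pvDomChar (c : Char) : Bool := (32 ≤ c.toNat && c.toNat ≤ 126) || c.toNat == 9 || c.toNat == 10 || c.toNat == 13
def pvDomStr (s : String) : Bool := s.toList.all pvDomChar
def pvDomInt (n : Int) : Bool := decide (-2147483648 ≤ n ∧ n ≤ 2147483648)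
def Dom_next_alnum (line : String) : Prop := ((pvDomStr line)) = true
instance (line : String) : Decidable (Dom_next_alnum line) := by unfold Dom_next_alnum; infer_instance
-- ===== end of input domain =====

-- B: splits the line into comma-separated segments and filters each segment's alphanumeric chars, instead of A's
-- single scan with a manual char accumulator and a chained ',' sentinel (idiomatic decomposition).


-- ===== PORT A =====
-- the loop body: word.append on alnum, then yield+reset on ','
def pvStepA (st : List Char × List String) (c : Char) : List Char × List String :=
  let word := if PySem.Chars.isalnum c then st.1 ++ [c] else st.1
  if c = ',' then ([], st.2 ++ [String.ofList word]) else (word, st.2)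

def next_alnum (line : String) : List String :=
  ((line.toList ++ [',']).foldl pvStepA ([], [])).2

-- ===== PORT B =====
def next_alnum_alt (line : String) : List String :=
  (PySem.Chars.splitOn line.toList ",".toList).map
    (fun seg => String.ofList (seg.filter PySem.Chars.isalnum))

-- ===== PRECONDITION & SPEC =====
def Spec_next_alnum (line : String) (out : List String) : Prop := out = next_alnum_alt line
instance (line : String) (out : List String) : Decidable (Spec_next_alnum line out) := by unfold Spec_next_alnum; infer_instance

-- ===== CLAIM (what is proved, stated in full; the proofs are below) =====
def Claim_equal_next_alnum : Prop := ∀ (line : String), Dom_next_alnum line → Spec_next_alnum line (next_alnum line)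

-- ===== LEMMAS AND PROOFS =====

-- simple structural recursion equal to splitOn on the single-char separator [',']
def pvSplit1 : List Char → List (List Char)
  | [] => [[]]
  | c :: rest => if c = ',' then [] :: pvSplit1 rest else (pvSplit1 rest).modifyHead (c :: ·)

theorem pvSplit1_cons (cs : List Char) : ∃ s rest, pvSplit1 cs = s :: rest := by
  induction cs with
  | nil => exact ⟨[], [], rfl⟩
  | cons c rest ih =>
    obtain ⟨s, r, h⟩ := ih
    by_cases hc : c = ','
    · exact ⟨[], pvSplit1 rest, by simp [pvSplit1, hc]⟩
    · exact ⟨c :: s, r, by simp [pvSplit1, hc, h]⟩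

theorem pvGo_eq (fuel : ℕ) : ∀ (l cur : List Char) (accr : List (List Char)),
    l.length < fuel →
    PySem.Chars.splitOn.go [','] fuel l cur accr
      = accr.reverse ++ (pvSplit1 l).modifyHead (cur.reverse ++ ·) := by
  induction fuel with
  | zero => intro l cur accr h; omega
  | succ f ih =>
    intro l cur accr h
    cases l with
    | nil =>
      simp [PySem.Chars.splitOn.go, pvSplit1]
    | cons c rest =>
      have hlen : rest.length < f := by
        simp only [List.length_cons] at h; omega
      simp only [PySem.Chars.splitOn.go, List.isPrefixOf, Bool.and_true]
      by_cases hc : c = ','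
      · have hb : (',' == c) = true := by simp [hc]
        have hdrop : List.drop [','].length (c :: rest) = rest := by simp
        simp only [hb, if_true, hdrop]
        rw [ih rest [] (cur.reverse :: accr) hlen]
        obtain ⟨s, r, hs⟩ := pvSplit1_cons rest
        simp [pvSplit1, hc, hs]
      · have hb : (',' == c) = false := beq_eq_false_iff_ne.mpr (Ne.symm hc)
        simp only [hb, Bool.false_eq_true, if_false]
        rw [ih rest (c :: cur) accr hlen]
        obtain ⟨s, r, hs⟩ := pvSplit1_cons rest
        simp [pvSplit1, hc, hs]

theorem pvSplitOn_eq (l : List Char) : PySem.Chars.splitOn l [','] = pvSplit1 l := by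
  unfold PySem.Chars.splitOn
  rw [pvGo_eq (l.length + 1) l [] [] (Nat.lt_succ_self _)]
  obtain ⟨s, r, hs⟩ := pvSplit1_cons l
  simp [hs]

theorem pvKey (cs : List Char) : ∀ (word : List Char) (out : List String),
    ((cs ++ [',']).foldl pvStepA (word, out)).2
      = out ++ (((pvSplit1 cs).map (·.filter PySem.Chars.isalnum)).modifyHead
          (word ++ ·)).map String.ofList := by
  induction cs with
  | nil =>
    intro word out
    have h : PySem.Chars.isalnum ',' = false := by decide
    simp [pvStepA, pvSplit1, h]
  | cons c rest ih =>
    intro word out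
    obtain ⟨s, r, hs⟩ := pvSplit1_cons rest
    by_cases hc : c = ','
    · have h : PySem.Chars.isalnum ',' = false := by decide
      simp only [hc, List.cons_append, List.foldl_cons, pvStepA, h, Bool.false_eq_true,
        ite_false, if_pos]
      rw [ih [] (out ++ [String.ofList word])]
      simp [pvSplit1, hs]
    · by_cases ha : PySem.Chars.isalnum c = true
      · simp only [List.cons_append, List.foldl_cons, pvStepA, ha, if_pos, hc, ite_false]
        rw [ih (word ++ [c]) out]
        simp [pvSplit1, hc, hs, ha]
      · simp only [List.cons_append, List.foldl_cons, pvStepA, ha, Bool.false_eq_true,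
          hc, ite_false]
        rw [ih word out]
        simp [pvSplit1, hc, hs, ha]

-- ===== VERDICT (by name: the statement is the Claim_ definition above) =====
theorem next_alnum_spec : Claim_equal_next_alnum := by
  intro line _
  unfold Spec_next_alnum next_alnum next_alnum_alt
  rw [pvKey]
  obtain ⟨s, r, h⟩ := pvSplit1_cons line.toList
  simp [pvSplitOn_eq, h, Function.comp]
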